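-- pv_equiv track=rewrite | github.com/FerFabbiano/Algoritmos-I | Ejercicios tipo Parcial - Guia.py | reemplazarPalabra
-- ===== SOURCE A (Python) =====
-- def reemplazarPalabra(texto):
--         palabra_nueva = " "
--         for caracter in texto:
--             if caracter == "m":
--                 palabra_nueva += "eme"
--             elif caracter == "M":
--                 palabra_nueva += "EME"
--             else:
--                 palabra_nueva += caracter
--         return palabra_nueva
-- ===== SOURCE B (Python) =====
-- def reemplazarPalabra(texto):
--     return " " + texto.replace("m", "eme").replace("M", "EME")
-- ===== Notes on version B (the rewrite author's own statement) =====
-- stated objective: faster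
-- what changed: Replaces the character-by-character if/elif accumulation loop with two chained str.replace builtin calls prefixed by the leading space; the replacement strings never re-trigger the second replacement, so chaining is exact.
import Mathlib
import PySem

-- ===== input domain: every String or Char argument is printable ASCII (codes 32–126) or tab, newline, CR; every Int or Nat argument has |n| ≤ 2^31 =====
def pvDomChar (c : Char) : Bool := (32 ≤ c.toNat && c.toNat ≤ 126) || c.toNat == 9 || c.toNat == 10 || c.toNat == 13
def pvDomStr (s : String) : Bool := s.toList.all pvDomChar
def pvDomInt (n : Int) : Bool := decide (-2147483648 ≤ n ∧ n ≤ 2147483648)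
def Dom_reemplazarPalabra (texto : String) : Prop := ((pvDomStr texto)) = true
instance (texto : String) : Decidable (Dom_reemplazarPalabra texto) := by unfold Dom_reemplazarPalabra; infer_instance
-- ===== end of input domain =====

-- B replaces A's per-character if/elif accumulation loop with two chained str.replace calls (idiomatic).

-- ===== PORT A =====
def reemplazarPalabra (texto : String) : String :=
  texto.toList.foldl
    (fun (acc : String) (c : Char) =>
      if c = 'm' then acc ++ "eme"
      else if c = 'M' then acc ++ "EME"
      else acc.push c)
    " "

-- ===== PORT B =====
def reemplazarPalabra_alt (texto : String) : String :=
  " " ++ PySem.Str.replace (PySem.Str.replace texto "m" "eme") "M" "EME"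

-- ===== PRECONDITION & SPEC =====
def Spec_reemplazarPalabra (texto : String) (out : String) : Prop := out = reemplazarPalabra_alt texto
instance (texto : String) (out : String) : Decidable (Spec_reemplazarPalabra texto out) := by unfold Spec_reemplazarPalabra; infer_instance

-- ===== CLAIM (what is proved, stated in full; the proofs are below) =====
def Claim_equal_reemplazarPalabra : Prop := ∀ (texto : String), Dom_reemplazarPalabra texto → Spec_reemplazarPalabra texto (reemplazarPalabra texto)

-- ===== LEMMAS AND PROOFS =====

-- Chars.replace with a single-char pattern is a flatMap.
theorem go_single (c₀ : Char) (new : List Char) :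
    ∀ (l : List Char) (fuel : Nat) (acc : List Char), l.length ≤ fuel →
    PySem.Chars.replace.go [c₀] new fuel l acc
      = acc.reverse ++ l.flatMap (fun c => if c = c₀ then new else [c])
  | [], fuel, acc, _ => by cases fuel <;> simp [PySem.Chars.replace.go]
  | c :: t, 0, acc, h => by simp at h
  | c :: t, fuel+1, acc, h => by
      have ht : t.length ≤ fuel := by simpa using h
      by_cases hc : c₀ = c
      · subst hc
        simp [PySem.Chars.replace.go, List.isPrefixOf, go_single c₀ new t fuel _ ht]
      · simp [PySem.Chars.replace.go, List.isPrefixOf, hc, Ne.symm hc,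
          go_single c₀ new t fuel _ ht]

theorem replace_single (s : List Char) (c₀ : Char) (new : List Char) :
    PySem.Chars.replace s [c₀] new = s.flatMap (fun c => if c = c₀ then new else [c]) := by
  simpa [PySem.Chars.replace] using go_single c₀ new s s.length [] (le_refl _)

theorem foldl_A (l : List Char) (acc : String) :
    (l.foldl
      (fun (acc : String) (c : Char) =>
        if c = 'm' then acc ++ "eme"
        else if c = 'M' then acc ++ "EME"
        else acc.push c)
      acc).toList
    = acc.toList ++ l.flatMap (fun c =>
        if c = 'm' then "eme".toList else if c = 'M' then "EME".toList else [c]) := by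
  induction l generalizing acc with
  | nil => simp
  | cons c t ih =>
      by_cases h1 : c = 'm'
      · simp [h1, ih]
      · by_cases h2 : c = 'M' <;> simp [h1, h2, ih]

-- ===== VERDICT (by name: the statement is the Claim_ definition above) =====
theorem reemplazarPalabra_spec : Claim_equal_reemplazarPalabra := by
  intro texto _
  unfold Spec_reemplazarPalabra reemplazarPalabra reemplazarPalabra_alt
  apply String.toList_inj.mp
  rw [foldl_A]
  simp [PySem.Str.replace, replace_single, List.flatMap_assoc]
  apply List.flatMap_congr
  intro c _
  by_cases h1 : c = 'm'
  · simp [h1]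
  · by_cases h2 : c = 'M' <;> simp [h1, h2]
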